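-- pv_equiv track=rewrite | github.com/CADacombs/rhinopython | spb_NurbsSrf_selGripsPerGrevillesClosestToObjs.py | _get_CP_indices_between_input_indices
-- ===== SOURCE A (Python) =====
-- def _get_CP_indices_between_input_indices(idxs_In, countV):
--     """
--     Parameters:
--         idxs_In: Flat list of int.
--
--     Returns: Flat list of int.
--     """
--
--     iVs_perU = {}
--     iUs_perV = {}
--     for idx in idxs_In:
--         iU = idx // countV
--         iV = idx % countV
--         if iU not in iVs_perU:
--             iVs_perU[iU] = [iV]
--         else:
--             iVs_perU[iU].append(iV)
--         if iV not in iUs_perV: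
--             iUs_perV[iV] = [iU]
--         else:
--             iUs_perV[iV].append(iU)
--
--     if not iVs_perU and not iUs_perV:
--         return []
--
--     idxs_Added = []
--
--     for iU in iVs_perU:
--         if len(iVs_perU[iU]) == 1:
--             continue
--         for iV in range(min(iVs_perU[iU])+1, max(iVs_perU[iU])):
--             idx_Btwn = iU*countV + iV
--             if idx_Btwn not in idxs_Added:
--                 idxs_Added.append(idx_Btwn)
--
--     for iV in iUs_perV:
--         if len(iUs_perV[iV]) == 1:
--             continue
--         for iU in range(min(iUs_perV[iV])+1, max(iUs_perV[iV])):
--             idx_Btwn = iU*countV + iV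
--             if idx_Btwn not in idxs_Added:
--                 idxs_Added.append(idx_Btwn)
--
--     return idxs_Added
-- ===== SOURCE B (Python) =====
-- def _get_CP_indices_between_input_indices(idxs_In, countV):
--     """
--     Parameters:
--         idxs_In: Flat list of int.
--
--     Returns: Flat list of int.
--     """
--
--     # Distinct row and column keys in first-appearance order.
--     rows = list(dict.fromkeys(idx // countV for idx in idxs_In))
--     cols = list(dict.fromkeys(idx % countV for idx in idxs_In))
--
--     # Generate every in-between candidate (duplicates allowed), rows then columns;
--     # the per-key extremes are found by rescanning idxs_In, so no grouping dict exists.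
--     cand = []
--     for iU in rows:
--         vs = [idx % countV for idx in idxs_In if idx // countV == iU]
--         cand.extend(iU*countV + iV for iV in range(min(vs)+1, max(vs)))
--     for iV in cols:
--         us = [idx // countV for idx in idxs_In if idx % countV == iV]
--         cand.extend(iU*countV + iV for iU in range(min(us)+1, max(us)))
--
--     # One order-preserving dedup at the end.
--     return list(dict.fromkeys(cand))
-- ===== Notes on version B (the rewrite author's own statement) =====
-- stated objective: alternative
-- what changed: B builds no grouping dicts and does no inline dedup: it extracts the distinct row/column keys by one ordered dedup (dict.fromkeys), rescans the input per key for the min/max extremes, collects all in-between candidates into one flat list, and applies a single order-preserving dict.fromkeys dedup at the end, where A incrementally builds two dicts of per-key lists and dedups each append with a linear `not in` list scan.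
import Mathlib
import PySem

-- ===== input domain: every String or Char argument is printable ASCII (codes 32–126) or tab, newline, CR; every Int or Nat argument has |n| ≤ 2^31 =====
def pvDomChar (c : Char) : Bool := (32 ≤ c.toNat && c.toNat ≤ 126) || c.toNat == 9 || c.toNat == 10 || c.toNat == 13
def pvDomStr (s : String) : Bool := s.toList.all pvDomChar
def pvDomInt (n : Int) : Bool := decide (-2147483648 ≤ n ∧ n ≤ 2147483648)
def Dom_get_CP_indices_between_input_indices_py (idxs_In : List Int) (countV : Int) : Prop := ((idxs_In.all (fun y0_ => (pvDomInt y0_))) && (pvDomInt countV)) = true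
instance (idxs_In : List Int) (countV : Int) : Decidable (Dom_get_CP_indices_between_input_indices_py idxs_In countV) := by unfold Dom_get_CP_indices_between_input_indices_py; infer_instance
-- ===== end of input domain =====

-- B replaces A's incrementally-built dicts of per-key index lists (with inline list-membership
-- dedup during the fills) by a staged pipeline: ordered-dedup key extraction, per-key rescans for
-- the extremes, one flat candidate list, and a single order-preserving dedup at the end.


-- ===== PORT A =====
-- literal transliteration of A: one pass building two dicts of per-key index lists
-- (append when present, fresh singleton otherwise), the empty guard, then two fill
-- passes over the dicts with min()/max() of each list and a `not in idxs_Added` dedup.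
-- (min/max of an empty list cannot occur — every stored list is built nonempty — so the
--  `| _, _ => acc` fallback of the match is unreachable.)
def get_CP_indices_between_input_indices_py (idxs_In : List Int) (countV : Int) : List Int :=
  let dicts : PySem.Dict Int (List Int) × PySem.Dict Int (List Int) :=
    idxs_In.foldl (fun st idx =>
      let iU := PySem.Int.floordiv idx countV
      let iV := PySem.Int.mod idx countV
      let d1 := if !st.1.contains iU then st.1.insert iU [iV]
                else st.1.modify iU [] (fun l => l ++ [iV])
      let d2 := if !st.2.contains iV then st.2.insert iV [iU]
                else st.2.modify iV [] (fun l => l ++ [iU])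
      (d1, d2)) (PySem.Dict.empty, PySem.Dict.empty)
  if dicts.1.items.isEmpty && dicts.2.items.isEmpty then []
  else
    let acc1 := dicts.1.items.foldl (fun acc p =>
      if p.2.length == 1 then acc
      else
        match PySem.List.min? p.2 (fun x => x), PySem.List.max? p.2 (fun x => x) with
        | some mn, some mx =>
            (PySem.List.pyRange (mn + 1) mx 1).foldl (fun acc iV =>
              let idx_Btwn := p.1 * countV + iV
              if acc.contains idx_Btwn then acc else acc ++ [idx_Btwn]) acc
        | _, _ => acc) []
    dicts.2.items.foldl (fun acc p =>
      if p.2.length == 1 then acc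
      else
        match PySem.List.min? p.2 (fun x => x), PySem.List.max? p.2 (fun x => x) with
        | some mn, some mx =>
            (PySem.List.pyRange (mn + 1) mx 1).foldl (fun acc iU =>
              let idx_Btwn := iU * countV + p.1
              if acc.contains idx_Btwn then acc else acc ++ [idx_Btwn]) acc
        | _, _ => acc) acc1

-- ===== PORT B =====
-- literal transliteration of B (Source B): distinct row/column keys by ordered dedup
-- (dict.fromkeys = PySem.List.dedup), per-key extremes by rescanning idxs_In
-- (min/max of a comprehension; the lists are nonempty since the key occurs, so the
-- getD 0 default is unreachable), all candidates collected flat, one final dedup.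
def get_CP_indices_between_input_indices_py_alt (idxs_In : List Int) (countV : Int) : List Int :=
  let rows := PySem.List.dedup (idxs_In.map (fun idx => PySem.Int.floordiv idx countV))
  let cols := PySem.List.dedup (idxs_In.map (fun idx => PySem.Int.mod idx countV))
  let cand1 := rows.foldl (fun cand iU =>
    let vs := (idxs_In.filter (fun idx => PySem.Int.floordiv idx countV == iU)).map
      (fun idx => PySem.Int.mod idx countV)
    cand ++ (PySem.List.pyRange ((PySem.List.min? vs (fun x => x)).getD 0 + 1)
      ((PySem.List.max? vs (fun x => x)).getD 0) 1).map (fun iV => iU * countV + iV)) []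
  let cand2 := cols.foldl (fun cand iV =>
    let us := (idxs_In.filter (fun idx => PySem.Int.mod idx countV == iV)).map
      (fun idx => PySem.Int.floordiv idx countV)
    cand ++ (PySem.List.pyRange ((PySem.List.min? us (fun x => x)).getD 0 + 1)
      ((PySem.List.max? us (fun x => x)).getD 0) 1).map (fun iU => iU * countV + iV)) cand1
  PySem.List.dedup cand2

-- ===== PRECONDITION & SPEC =====
-- Pre_ excludes exactly the inputs where Python A raises ZeroDivisionError:
-- countV = 0 with a nonempty idxs_In (idx // 0). (B raises there too.)
def Pre_get_CP_indices_between_input_indices_py (idxs_In : List Int) (countV : Int) : Prop :=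
  idxs_In = [] ∨ countV ≠ 0
instance (idxs_In : List Int) (countV : Int) : Decidable (Pre_get_CP_indices_between_input_indices_py idxs_In countV) := by unfold Pre_get_CP_indices_between_input_indices_py; infer_instance

def pvWitness_get_CP_indices_between_input_indices_py : List Int × Int := ([0, 2, 5, 7], 3)

def Spec_get_CP_indices_between_input_indices_py (idxs_In : List Int) (countV : Int) (out : List Int) : Prop := out = get_CP_indices_between_input_indices_py_alt idxs_In countV
instance (idxs_In : List Int) (countV : Int) (out : List Int) : Decidable (Spec_get_CP_indices_between_input_indices_py idxs_In countV out) := by unfold Spec_get_CP_indices_between_input_indices_py; infer_instance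

-- ===== CLAIM (what is proved, stated in full; the proofs are below) =====
def Claim_equal_get_CP_indices_between_input_indices_py : Prop := ∀ (idxs_In : List Int) (countV : Int), Dom_get_CP_indices_between_input_indices_py idxs_In countV → Pre_get_CP_indices_between_input_indices_py idxs_In countV → Spec_get_CP_indices_between_input_indices_py idxs_In countV (get_CP_indices_between_input_indices_py idxs_In countV)

-- ===== LEMMAS AND PROOFS =====

-- A's incremental `if x not in acc: acc.append(x)` dedup loop, as a reusable fold
def pvDedupFold (acc l : List Int) : List Int :=
  l.foldl (fun a x => if a.contains x then a else a ++ [x]) acc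

-- the per-key grouped values (B's rescan comprehension, and A's stored list)
def pvGrp (f g : Int → Int) (idxs : List Int) (k : Int) : List Int :=
  (idxs.filter (fun i => f i == k)).map g

-- the flat candidate list of one phase
def pvFlat (h : Int → Int → Int) (G : Int → List Int) (keys : List Int) : List Int :=
  keys.flatMap (fun k =>
    (PySem.List.pyRange ((PySem.List.min? (G k) (fun x => x)).getD 0 + 1)
      ((PySem.List.max? (G k) (fun x => x)).getD 0) 1).map (fun iv => h k iv))

theorem pvDedupFold_append (acc l1 l2 : List Int) :
    pvDedupFold acc (l1 ++ l2) = pvDedupFold (pvDedupFold acc l1) l2 :=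
  List.foldl_append

-- A's branchy dict update is exactly Dict.modify with default []
theorem branch_eq_modify (d : PySem.Dict Int (List Int)) (k v : Int) :
    (if !d.contains k then d.insert k [v] else d.modify k [] (fun l => l ++ [v]))
      = d.modify k [] (fun l => l ++ [v]) := by
  by_cases h : d.contains k = true
  · simp [h]
  · have h' : d.contains k = false := by simpa using h
    simp only [h', Bool.not_false, if_true]
    simp [PySem.Dict.modify, PySem.Dict.getD_of_not_contains d _ h']

-- characterisation of A's grouping dict: keys in first-appearance order,
-- each key's list = the values of its occurrences in order
theorem dictA_char (f g : Int → Int) (idxs : List Int) :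
    (idxs.foldl (fun d idx =>
        if !d.contains (f idx) then d.insert (f idx) [g idx]
        else d.modify (f idx) [] (fun l => l ++ [g idx])) PySem.Dict.empty).items
      = (PySem.List.dedup (idxs.map f)).map (fun k => (k, pvGrp f g idxs k)) := by
  have h1 : idxs.foldl (fun d idx =>
        if !d.contains (f idx) then d.insert (f idx) [g idx]
        else d.modify (f idx) [] (fun l => l ++ [g idx])) PySem.Dict.empty
      = (idxs.map (fun i => (f i, g i))).foldl
          (fun d p => d.modify p.1 [] (fun l => l ++ [p.2])) PySem.Dict.empty := by
    rw [List.foldl_map]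
    apply PySem.List.foldl_congr_mem
    intro d i _
    exact branch_eq_modify d (f i) (g i)
  rw [h1]
  have hnd : ((idxs.map (fun i => (f i, g i))).foldl
      (fun d p => d.modify p.1 [] (fun l => l ++ [p.2])) PySem.Dict.empty).keys.Nodup := by
    exact PySem.Dict.nodup_keys_foldl_modify_key _ _ _ _ _ PySem.Dict.nodup_keys_empty
  rw [PySem.Dict.items_eq_map_keys _ hnd []]
  have hkeys : ((idxs.map (fun i => (f i, g i))).foldl
      (fun d p => d.modify p.1 [] (fun l => l ++ [p.2])) PySem.Dict.empty).keys
      = PySem.List.dedup (idxs.map f) := by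
    rw [PySem.Dict.keys_foldl_modify_key]
    simp [List.map_map, Function.comp_def, PySem.Dict.keys_empty]
    rfl
  rw [hkeys]
  apply List.map_congr_left
  intro k _
  rw [PySem.Dict.getD_foldl_modify_append]
  have hfil : ((idxs.map (fun i => (f i, g i))).filter (fun p => p.1 == k))
      = (idxs.filter (fun i => f i == k)).map (fun i => (f i, g i)) := by
    rw [List.filter_map]
    simp [Function.comp_def]
  simp [hfil, List.map_map, Function.comp_def, pvGrp, PySem.Dict.getD_empty]

-- one fill phase of A over a grouping dict's items = incremental dedup of the flat candidates
theorem phaseA (h : Int → Int → Int) (keys : List Int) (G : Int → List Int) :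
    ∀ (acc : List Int), (∀ k ∈ keys, G k ≠ []) →
    (keys.map (fun k => (k, G k))).foldl (fun acc p =>
      if p.2.length == 1 then acc
      else
        match PySem.List.min? p.2 (fun x => x), PySem.List.max? p.2 (fun x => x) with
        | some mn, some mx =>
            (PySem.List.pyRange (mn + 1) mx 1).foldl (fun acc iv =>
              if acc.contains (h p.1 iv) then acc else acc ++ [h p.1 iv]) acc
        | _, _ => acc) acc
      = pvDedupFold acc (pvFlat h G keys) := by
  induction keys with
  | nil => intro acc _; simp [pvFlat, pvDedupFold]
  | cons k ks ih =>
      intro acc hne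
      simp only [List.map_cons, List.foldl_cons]
      have hstep : pvDedupFold acc (pvFlat h G (k :: ks))
          = pvDedupFold (pvDedupFold acc
              ((PySem.List.pyRange ((PySem.List.min? (G k) (fun x => x)).getD 0 + 1)
                ((PySem.List.max? (G k) (fun x => x)).getD 0) 1).map (fun iv => h k iv)))
              (pvFlat h G ks) := by
        simp only [pvFlat, List.flatMap_cons]
        exact pvDedupFold_append _ _ _
      rw [hstep]
      have hne' : ∀ k' ∈ ks, G k' ≠ [] := fun k' hk' => hne k' (List.mem_cons_of_mem _ hk')
      cases hG : G k with
      | nil => exact absurd hG (hne k (List.mem_cons_self))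
      | cons v t =>
        cases t with
        | nil =>
            -- singleton group: A skips (len == 1), the candidate range (v+1, v) is empty
            have hr : PySem.List.pyRange ((PySem.List.min? [v] (fun x => x)).getD 0 + 1)
                ((PySem.List.max? [v] (fun x => x)).getD 0) 1 = [] := by
              rw [PySem.List.min?_id_cons, PySem.List.max?_id_cons]
              apply PySem.List.pyRange_one_eq_nil
              simp
            rw [hr]
            simpa [pvDedupFold] using ih acc hne'
        | cons v2 t2 =>
            -- ≥ 2 elements: both sides loop over range(min+1, max)
            have hmn := PySem.List.min?_id_cons v (v2 :: t2)
            have hmx := PySem.List.max?_id_cons v (v2 :: t2)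
            have hlen : ((v :: v2 :: t2).length == 1) = false := by simp
            rw [hmn, hmx]
            simp only [hlen, Bool.false_eq_true, if_false, Option.getD_some]
            have hinner : ∀ (a : List Int),
                (PySem.List.pyRange (((v2 :: t2).foldl min v) + 1)
                  ((v2 :: t2).foldl max v) 1).foldl (fun acc iv =>
                    if acc.contains (h k iv) then acc else acc ++ [h k iv]) a
                = pvDedupFold a
                    ((PySem.List.pyRange (((v2 :: t2).foldl min v) + 1)
                      ((v2 :: t2).foldl max v) 1).map (fun iv => h k iv)) := by
              intro a
              simp only [pvDedupFold, List.foldl_map]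
            rw [hinner]
            exact ih _ hne'

-- one collection phase of B = appending the flat candidates
theorem phaseB (h : Int → Int → Int) (G : Int → List Int) (keys acc : List Int) :
    keys.foldl (fun cand k =>
      cand ++ (PySem.List.pyRange ((PySem.List.min? (G k) (fun x => x)).getD 0 + 1)
        ((PySem.List.max? (G k) (fun x => x)).getD 0) 1).map (fun iv => h k iv)) acc
      = acc ++ pvFlat h G keys :=
  PySem.List.foldl_append_eq_flatMap _ _ _

theorem pvGrp_ne_nil (f g : Int → Int) (idxs : List Int) (k : Int)
    (hk : k ∈ PySem.List.dedup (idxs.map f)) : pvGrp f g idxs k ≠ [] := by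
  rw [PySem.List.mem_dedup] at hk
  obtain ⟨i, hi, hfi⟩ := List.mem_map.mp hk
  have : i ∈ idxs.filter (fun i => f i == k) := by
    simp [List.mem_filter, hi, hfi]
  simp only [pvGrp, ne_eq, List.map_eq_nil_iff]
  exact List.ne_nil_of_mem this

theorem main_eq (idxs : List Int) (countV : Int) :
    get_CP_indices_between_input_indices_py idxs countV
      = get_CP_indices_between_input_indices_py_alt idxs countV := by
  cases idxs with
  | nil => rfl
  | cons i rest =>
    unfold get_CP_indices_between_input_indices_py get_CP_indices_between_input_indices_py_alt
    simp only []
    have hsp : ((i :: rest).foldl (fun (st : PySem.Dict Int (List Int) × PySem.Dict Int (List Int)) idx =>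
        let iU := PySem.Int.floordiv idx countV
        let iV := PySem.Int.mod idx countV
        let d1 := if !st.1.contains iU then st.1.insert iU [iV]
                  else st.1.modify iU [] (fun l => l ++ [iV])
        let d2 := if !st.2.contains iV then st.2.insert iV [iU]
                  else st.2.modify iV [] (fun l => l ++ [iU])
        (d1, d2)) (PySem.Dict.empty, PySem.Dict.empty))
        = ((i :: rest).foldl (fun d idx =>
            if !d.contains (PySem.Int.floordiv idx countV)
            then d.insert (PySem.Int.floordiv idx countV) [PySem.Int.mod idx countV]
            else d.modify (PySem.Int.floordiv idx countV) []
              (fun l => l ++ [PySem.Int.mod idx countV])) PySem.Dict.empty,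
          (i :: rest).foldl (fun d idx =>
            if !d.contains (PySem.Int.mod idx countV)
            then d.insert (PySem.Int.mod idx countV) [PySem.Int.floordiv idx countV]
            else d.modify (PySem.Int.mod idx countV) []
              (fun l => l ++ [PySem.Int.floordiv idx countV])) PySem.Dict.empty) :=
      PySem.List.foldl_prod_mk
        (f := fun (d : PySem.Dict Int (List Int)) (idx : Int) =>
          if !d.contains (PySem.Int.floordiv idx countV)
          then d.insert (PySem.Int.floordiv idx countV) [PySem.Int.mod idx countV]
          else d.modify (PySem.Int.floordiv idx countV) []
            (fun l => l ++ [PySem.Int.mod idx countV]))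
        (g := fun (d : PySem.Dict Int (List Int)) (idx : Int) =>
          if !d.contains (PySem.Int.mod idx countV)
          then d.insert (PySem.Int.mod idx countV) [PySem.Int.floordiv idx countV]
          else d.modify (PySem.Int.mod idx countV) []
            (fun l => l ++ [PySem.Int.floordiv idx countV])) _ _ _
    rw [hsp]
    have hA1 := dictA_char (fun idx => PySem.Int.floordiv idx countV)
      (fun idx => PySem.Int.mod idx countV) (i :: rest)
    have hA2 := dictA_char (fun idx => PySem.Int.mod idx countV)
      (fun idx => PySem.Int.floordiv idx countV) (i :: rest)
    simp only [] at hA1 hA2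
    rw [hA1, hA2]
    -- the guard is false: both key lists are nonempty
    have hne1 : PySem.List.dedup ((i :: rest).map (fun idx => PySem.Int.floordiv idx countV)) ≠ [] := by
      have : PySem.Int.floordiv i countV
          ∈ PySem.List.dedup ((i :: rest).map (fun idx => PySem.Int.floordiv idx countV)) := by
        rw [PySem.List.mem_dedup]
        exact List.mem_map_of_mem List.mem_cons_self
      exact List.ne_nil_of_mem this
    rw [if_neg (by
      obtain ⟨x1, l1, hd1⟩ := List.exists_cons_of_ne_nil hne1
      rw [hd1]; simp)]
    -- A's two fill passes = incremental dedup of the two flat candidate lists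
    have e1 := phaseA (fun k iv => k * countV + iv)
      (PySem.List.dedup ((i :: rest).map (fun idx => PySem.Int.floordiv idx countV)))
      (pvGrp (fun idx => PySem.Int.floordiv idx countV) (fun idx => PySem.Int.mod idx countV) (i :: rest))
      []
      (fun k hk => pvGrp_ne_nil _ _ _ _ hk)
    have e2 := phaseA (fun k iu => iu * countV + k)
      (PySem.List.dedup ((i :: rest).map (fun idx => PySem.Int.mod idx countV)))
      (pvGrp (fun idx => PySem.Int.mod idx countV) (fun idx => PySem.Int.floordiv idx countV) (i :: rest))
      (pvDedupFold [] (pvFlat (fun k iv => k * countV + iv)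
        (pvGrp (fun idx => PySem.Int.floordiv idx countV) (fun idx => PySem.Int.mod idx countV) (i :: rest))
        (PySem.List.dedup ((i :: rest).map (fun idx => PySem.Int.floordiv idx countV)))))
      (fun k hk => pvGrp_ne_nil _ _ _ _ hk)
    simp only [] at e1 e2
    rw [e1, e2]
    -- B's two collection passes = the same flat candidate lists, deduplicated once
    have e3 := phaseB (fun k iv => k * countV + iv)
      (pvGrp (fun idx => PySem.Int.floordiv idx countV) (fun idx => PySem.Int.mod idx countV) (i :: rest))
      (PySem.List.dedup ((i :: rest).map (fun idx => PySem.Int.floordiv idx countV))) []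
    have e4 := phaseB (fun k iu => iu * countV + k)
      (pvGrp (fun idx => PySem.Int.mod idx countV) (fun idx => PySem.Int.floordiv idx countV) (i :: rest))
      (PySem.List.dedup ((i :: rest).map (fun idx => PySem.Int.mod idx countV)))
      ([] ++ pvFlat (fun k iv => k * countV + iv)
        (pvGrp (fun idx => PySem.Int.floordiv idx countV) (fun idx => PySem.Int.mod idx countV) (i :: rest))
        (PySem.List.dedup ((i :: rest).map (fun idx => PySem.Int.floordiv idx countV))))
    simp only [pvGrp] at e3 e4
    rw [e3, e4]
    simp only [List.nil_append]
    exact (pvDedupFold_append [] _ _).symm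

-- ===== VERDICT (by name: the statement is the Claim_ definition above) =====
theorem get_CP_indices_between_input_indices_py_spec : Claim_equal_get_CP_indices_between_input_indices_py := by
  intro idxs countV _ _
  exact main_eq idxs countV
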